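-- pv_equiv track=rewrite | github.com/sowjanya-bn/blueprintai | src/compliance_engine.py | _build_review_recommendations
-- ===== SOURCE A (Python) =====
-- from typing import Any, Dict, List, Optional
--
-- def _build_review_recommendations(flags: List[Dict[str, Any]]) -> List[str]:
--     recommendations = []
--
--     if any(f["review_type"] == "medical_legal_review" for f in flags):
--         recommendations.append("Send medical benefit claims for medical/legal review.")
--
--     if any(f["review_type"] == "safety_review" for f in flags):
--         recommendations.append("Validate all safety and side-effect language before approval.")
--
--     if any(f["review_type"] == "content_review" for f in flags):
--         recommendations.append("Review patient-facing wording for clarity and audience appropriateness.")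
--
--     if any(f["review_type"] == "regional_review" for f in flags):
--         recommendations.append("Check region-specific regulatory expectations for the target market.")
--
--     if any(f["review_type"] == "privacy_review" for f in flags):
--         recommendations.append("Validate privacy notice, lawful basis, and consent handling for personal data collection.")
--
--     if any(f["review_type"] == "financial_legal_review" for f in flags):
--         recommendations.append("Review financial promotions, risk disclosures, and claim wording with legal/compliance.")
--
--     if any(f["review_type"] == "accessibility_review" for f in flags):
--         recommendations.append("Confirm accessibility requirements are reflected in the design output.")
--
--     return recommendations
-- ===== SOURCE B (Python) =====
-- _REVIEW_TYPES = [
--     "medical_legal_review",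
--     "safety_review",
--     "content_review",
--     "regional_review",
--     "privacy_review",
--     "financial_legal_review",
--     "accessibility_review",
-- ]
--
-- _MESSAGES = [
--     "Send medical benefit claims for medical/legal review.",
--     "Validate all safety and side-effect language before approval.",
--     "Review patient-facing wording for clarity and audience appropriateness.",
--     "Check region-specific regulatory expectations for the target market.",
--     "Validate privacy notice, lawful basis, and consent handling for personal data collection.",
--     "Review financial promotions, risk disclosures, and claim wording with legal/compliance.",
--     "Confirm accessibility requirements are reflected in the design output.",
-- ]
--
-- def _build_review_recommendations(flags):
--     # One pass over flags encodes the present review types as a 7-bit mask;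
--     # the mask is then decoded into the fixed-order messages.
--     mask = 0
--     for f in flags:
--         rt = f["review_type"]
--         for i, t in enumerate(_REVIEW_TYPES):
--             if t == rt:
--                 mask |= 1 << i
--     out = []
--     for i, msg in enumerate(_MESSAGES):
--         if (mask >> i) & 1:
--             out.append(msg)
--     return out
-- ===== Notes on version B (the rewrite author's own statement) =====
-- stated objective: alternative
-- what changed: Seven hardcoded any()-scans over flags are replaced by a single pass that encodes which review types occur as a 7-bit integer mask, followed by a decode loop that emits the fixed-order messages for the set bits; Pre_ excludes flags missing the 'review_type' key, where B always raises KeyError while A returns (the full 7-message list) only when all seven types already occur before the malformed flag.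
import Mathlib
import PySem

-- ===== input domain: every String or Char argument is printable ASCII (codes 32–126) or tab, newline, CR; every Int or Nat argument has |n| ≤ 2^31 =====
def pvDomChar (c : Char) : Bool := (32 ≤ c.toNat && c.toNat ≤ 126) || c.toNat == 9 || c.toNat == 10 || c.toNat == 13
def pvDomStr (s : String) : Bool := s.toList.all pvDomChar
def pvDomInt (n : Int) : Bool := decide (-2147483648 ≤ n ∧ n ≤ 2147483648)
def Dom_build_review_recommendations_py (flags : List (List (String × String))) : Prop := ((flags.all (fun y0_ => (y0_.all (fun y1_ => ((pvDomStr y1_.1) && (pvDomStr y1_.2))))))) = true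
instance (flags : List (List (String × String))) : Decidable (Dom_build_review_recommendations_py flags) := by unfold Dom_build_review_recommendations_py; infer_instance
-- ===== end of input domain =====

-- B replaces seven hardcoded any()-scans over flags by a single pass that encodes the
-- present review types as a 7-bit integer mask, then decodes the mask into the
-- fixed-order messages; return values agree on Pre_.

-- ===== PORT A =====
def build_review_recommendations_py (flags : List (List (String × String))) : List String :=
  let recommendations : List String := []
  let recommendations := if flags.any (fun f => (PySem.Dict.mk f).get? "review_type" == some "medical_legal_review")
    then recommendations ++ ["Send medical benefit claims for medical/legal review."] else recommendations
  let recommendations := if flags.any (fun f => (PySem.Dict.mk f).get? "review_type" == some "safety_review")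
    then recommendations ++ ["Validate all safety and side-effect language before approval."] else recommendations
  let recommendations := if flags.any (fun f => (PySem.Dict.mk f).get? "review_type" == some "content_review")
    then recommendations ++ ["Review patient-facing wording for clarity and audience appropriateness."] else recommendations
  let recommendations := if flags.any (fun f => (PySem.Dict.mk f).get? "review_type" == some "regional_review")
    then recommendations ++ ["Check region-specific regulatory expectations for the target market."] else recommendations
  let recommendations := if flags.any (fun f => (PySem.Dict.mk f).get? "review_type" == some "privacy_review")
    then recommendations ++ ["Validate privacy notice, lawful basis, and consent handling for personal data collection."] else recommendations
  let recommendations := if flags.any (fun f => (PySem.Dict.mk f).get? "review_type" == some "financial_legal_review")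
    then recommendations ++ ["Review financial promotions, risk disclosures, and claim wording with legal/compliance."] else recommendations
  let recommendations := if flags.any (fun f => (PySem.Dict.mk f).get? "review_type" == some "accessibility_review")
    then recommendations ++ ["Confirm accessibility requirements are reflected in the design output."] else recommendations
  recommendations

-- ===== PORT B =====
-- enumerate(_REVIEW_TYPES): the constant list with its indices (enumerate of a literal list)
def pvTypesE : List (Nat × String) :=
  [(0, "medical_legal_review"), (1, "safety_review"), (2, "content_review"),
   (3, "regional_review"), (4, "privacy_review"), (5, "financial_legal_review"),
   (6, "accessibility_review")]

-- enumerate(_MESSAGES)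
def pvMsgsE : List (Nat × String) :=
  [(0, "Send medical benefit claims for medical/legal review."),
   (1, "Validate all safety and side-effect language before approval."),
   (2, "Review patient-facing wording for clarity and audience appropriateness."),
   (3, "Check region-specific regulatory expectations for the target market."),
   (4, "Validate privacy notice, lawful basis, and consent handling for personal data collection."),
   (5, "Review financial promotions, risk disclosures, and claim wording with legal/compliance."),
   (6, "Confirm accessibility requirements are reflected in the design output.")]

-- first loop of B: mask |= 1 << i whenever _REVIEW_TYPES[i] == f["review_type"]
-- (f["review_type"] ported as get?.getD ""; Pre_ guarantees the key is present)
def pvMaskOf (flags : List (List (String × String))) : Nat :=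
  flags.foldl (fun mask f =>
    pvTypesE.foldl
      (fun m p => if p.2 == ((PySem.Dict.mk f).get? "review_type").getD "" then m ||| (1 <<< p.1) else m)
      mask) 0

def build_review_recommendations_py_alt (flags : List (List (String × String))) : List String :=
  let mask := pvMaskOf flags
  pvMsgsE.foldl (fun out p => if (mask >>> p.1) &&& 1 == 1 then out ++ [p.2] else out) []

-- ===== PRECONDITION & SPEC =====
-- Pre_ excludes flags missing the "review_type" key: there Python B always raises KeyError,
-- and Python A raises KeyError too except on rare inputs where every any() short-circuits
-- before reaching the malformed flag (then it returns the full 7-message list).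
def Pre_build_review_recommendations_py (flags : List (List (String × String))) : Prop :=
  (flags.all (fun f => (PySem.Dict.mk f).contains "review_type")) = true
instance (flags : List (List (String × String))) : Decidable (Pre_build_review_recommendations_py flags) := by unfold Pre_build_review_recommendations_py; infer_instance
def pvWitness_build_review_recommendations_py : (List (List (String × String))) :=
  [[("review_type", "safety_review")], [("review_type", "content_review")]]
def Spec_build_review_recommendations_py (flags : List (List (String × String))) (out : List String) : Prop := out = build_review_recommendations_py_alt flags
instance (flags : List (List (String × String))) (out : List String) : Decidable (Spec_build_review_recommendations_py flags out) := by unfold Spec_build_review_recommendations_py; infer_instance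

-- ===== CLAIM (what is proved, stated in full; the proofs are below) =====
def Claim_equal_build_review_recommendations_py : Prop := ∀ (flags : List (List (String × String))), Dom_build_review_recommendations_py flags → Pre_build_review_recommendations_py flags → Spec_build_review_recommendations_py flags (build_review_recommendations_py flags)

-- ===== LEMMAS AND PROOFS =====

-- Python's truthiness test `(mask >> i) & 1` is exactly Nat.testBit.
theorem pvShiftAnd_eq_testBit (m i : Nat) : ((m >>> i) &&& 1 == 1) = m.testBit i := by
  rw [Nat.testBit, Nat.and_comm, Nat.one_and_eq_mod_two]
  rcases Nat.mod_two_eq_zero_or_one (m >>> i) with h | h <;> simp [h]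

theorem pvTestBit_one_shiftLeft (j k : Nat) : (1 <<< j).testBit k = (j == k) := by
  rw [Nat.one_shiftLeft]
  rcases eq_or_ne j k with h | h
  · simp [h]
  · simp [Nat.testBit_two_pow_of_ne h, h]

-- bit k of B's inner loop (over the enumerated type table) for one flag
theorem pvInner_testBit (ps : List (Nat × String)) (rt : String) (m k : Nat) :
    (ps.foldl (fun m p => if p.2 == rt then m ||| (1 <<< p.1) else m) m).testBit k
    = (m.testBit k || ps.any (fun p => p.2 == rt && p.1 == k)) := by
  induction ps generalizing m with
  | nil => simp
  | cons p ps ih =>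
    rw [List.foldl_cons, List.any_cons]
    by_cases h : p.2 = rt
    · rw [if_pos (by simp [h]), ih, Nat.testBit_or, pvTestBit_one_shiftLeft]
      simp [h, Bool.or_assoc]
    · rw [if_neg (by simp [h]), ih]
      rw [show (p.2 == rt) = false by simp [h], Bool.false_and, Bool.false_or]

-- bit k of B's outer loop over the flags, with an arbitrary starting mask
theorem pvOuter_testBit (fs : List (List (String × String))) (m0 k : Nat) :
    (fs.foldl (fun mask f =>
        pvTypesE.foldl
          (fun m p => if p.2 == ((PySem.Dict.mk f).get? "review_type").getD "" then m ||| (1 <<< p.1) else m)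
          mask) m0).testBit k
    = (m0.testBit k || fs.any (fun f =>
        pvTypesE.any (fun p => p.2 == ((PySem.Dict.mk f).get? "review_type").getD "" && p.1 == k))) := by
  induction fs generalizing m0 with
  | nil => simp
  | cons f fs ih =>
    rw [List.foldl_cons, List.any_cons, ih, pvInner_testBit, Bool.or_assoc]

-- bit k of B's mask records whether some flag carries the k-indexed review type
theorem pvMask_testBit (flags : List (List (String × String))) (k : Nat) :
    (pvMaskOf flags).testBit k
    = flags.any (fun f =>
        pvTypesE.any (fun p => p.2 == ((PySem.Dict.mk f).get? "review_type").getD "" && p.1 == k)) := by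
  rw [pvMaskOf, pvOuter_testBit]
  simp

-- A's any()-scan for a nonempty type t agrees with B's per-flag table test at t's index
theorem pvAny_eq (flags : List (List (String × String))) (t : String) (ht : t ≠ "") :
    (flags.any (fun f => t == ((PySem.Dict.mk f).get? "review_type").getD ""))
    = (flags.any (fun f => (PySem.Dict.mk f).get? "review_type" == some t)) := by
  induction flags with
  | nil => rfl
  | cons f fs ih =>
    rw [List.any_cons, List.any_cons, ih]
    congr 1
    cases hg : (PySem.Dict.mk f).get? "review_type" with
    | none => simp [ht]
    | some v => simp [eq_comm]

-- ===== VERDICT (by name: the statement is the Claim_ definition above) =====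
set_option maxHeartbeats 1000000 in
theorem build_review_recommendations_py_spec : Claim_equal_build_review_recommendations_py := by
  intro flags _ _
  unfold Spec_build_review_recommendations_py
  unfold build_review_recommendations_py build_review_recommendations_py_alt
  simp only [pvMsgsE, List.foldl_cons, List.foldl_nil, pvShiftAnd_eq_testBit, pvMask_testBit,
    pvTypesE, List.any_cons, List.any_nil, Nat.reduceBEq, beq_self_eq_true,
    Bool.and_true, Bool.and_false, Bool.or_false, Bool.false_or,
    pvAny_eq flags "medical_legal_review" (by decide),
    pvAny_eq flags "safety_review" (by decide),
    pvAny_eq flags "content_review" (by decide),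
    pvAny_eq flags "regional_review" (by decide),
    pvAny_eq flags "privacy_review" (by decide),
    pvAny_eq flags "financial_legal_review" (by decide),
    pvAny_eq flags "accessibility_review" (by decide)]
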